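-- pv_equiv track=rewrite | github.com/DrPuiu/Python | lab3.py | count_unique_and_duplicate_elements
-- ===== SOURCE A (Python) =====
-- def count_unique_and_duplicate_elements(input_list):
--     unique_elements = set()
--     duplicate_elements = set()
--
--     for element in input_list:
--         if element in unique_elements:
--             duplicate_elements.add(element)
--         else:
--             unique_elements.add(element)
--
--     return len(unique_elements), len(duplicate_elements)
-- ===== SOURCE B (Python) =====
-- def count_unique_and_duplicate_elements(input_list):
--     s = sorted(input_list)
--     distinct = 0
--     multiple = 0
--     i = 0
--     n = len(s)
--     while i < n:
--         j = i + 1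
--         while j < n and s[j] == s[i]:
--             j += 1
--         distinct += 1
--         if j - i > 1:
--             multiple += 1
--         i = j
--     return distinct, multiple
-- ===== Notes on version B (the rewrite author's own statement) =====
-- stated objective: alternative
-- what changed: Replaces the hash-set single pass by sort-then-run-scan: sort the list, then walk maximal runs of equal elements, counting runs (distinct elements) and runs of length > 1 (duplicated elements).
import Mathlib
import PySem

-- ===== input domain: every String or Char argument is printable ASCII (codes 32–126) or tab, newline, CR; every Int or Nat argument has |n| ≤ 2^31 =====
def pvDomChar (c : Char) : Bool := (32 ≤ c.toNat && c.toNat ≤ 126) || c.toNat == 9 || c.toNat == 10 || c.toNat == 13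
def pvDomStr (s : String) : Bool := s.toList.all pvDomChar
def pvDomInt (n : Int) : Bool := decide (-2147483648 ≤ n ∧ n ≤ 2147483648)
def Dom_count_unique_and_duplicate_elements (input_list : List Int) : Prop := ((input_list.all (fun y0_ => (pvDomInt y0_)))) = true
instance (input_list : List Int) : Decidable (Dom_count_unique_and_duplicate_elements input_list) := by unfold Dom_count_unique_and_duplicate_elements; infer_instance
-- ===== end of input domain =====

-- B replaces A's two incrementally maintained hash sets (one pass, per-element membership branch)
-- by sort-then-run-scan: sort, then walk maximal runs of equal elements (alternative algorithm, return value only).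


-- ===== PORT A =====
-- A's loop body: add a re-seen element to the duplicate set, a fresh one to the unique set.
def pvStepA (st : PySem.Set Int × PySem.Set Int) (element : Int) : PySem.Set Int × PySem.Set Int :=
  if st.1.contains element then (st.1, st.2.add element)
  else (st.1.add element, st.2)

-- A: one pass maintaining the 'unique' (seen) set and the 'duplicate' (re-seen) set.
def count_unique_and_duplicate_elements (input_list : List Int) : Int × Int :=
  let st := input_list.foldl pvStepA (PySem.Set.empty, PySem.Set.empty)
  ((st.1.length : Int), (st.2.length : Int))

-- ===== PORT B =====
-- B's outer while loop over the sorted list: the inner while 'j += 1 while s[j] == s[i]'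
-- is the takeWhile/dropWhile split of the current run; 'j - i > 1' is 'run nonempty'.
def pvScanRuns : List Int → Int → Int → Int × Int
  | [], distinct, multiple => (distinct, multiple)
  | a :: rest, distinct, multiple =>
      pvScanRuns (rest.dropWhile (fun x => x == a)) (distinct + 1)
        (if 0 < (rest.takeWhile (fun x => x == a)).length then multiple + 1 else multiple)
termination_by l _ _ => l.length
decreasing_by
  have := List.length_dropWhile_le (p := fun x => x == a) (l := rest)
  simp; omega

-- B: sort, then scan the maximal runs of equal elements.
def count_unique_and_duplicate_elements_alt (input_list : List Int) : Int × Int :=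
  pvScanRuns (PySem.List.sorted input_list (fun x => x) false) 0 0

-- ===== PRECONDITION & SPEC =====
def Spec_count_unique_and_duplicate_elements (input_list : List Int) (out : Int × Int) : Prop := out = count_unique_and_duplicate_elements_alt input_list
instance (input_list : List Int) (out : Int × Int) : Decidable (Spec_count_unique_and_duplicate_elements input_list out) := by unfold Spec_count_unique_and_duplicate_elements; infer_instance

-- ===== CLAIM (what is proved, stated in full; the proofs are below) =====
def Claim_equal_count_unique_and_duplicate_elements : Prop := ∀ (input_list : List Int), Dom_count_unique_and_duplicate_elements input_list → Spec_count_unique_and_duplicate_elements input_list (count_unique_and_duplicate_elements input_list)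

-- ===== LEMMAS AND PROOFS =====

-- the common specification both programs compute: #distinct, #elements occurring ≥ 2 times
def pvD (l : List Int) : Nat := l.toFinset.card
def pvM (l : List Int) : Nat := (l.toFinset.filter (fun y => 2 ≤ l.count y)).card

theorem pvCountCons (a y : Int) (xs : List Int) :
    (a :: xs).count y = xs.count y + (if y = a then 1 else 0) := by
  rcases eq_or_ne y a with h | h
  · subst h; simp
  · simp [h, Ne.symm h]

-- ---- A-side: A computes (pvD, pvM) ----

-- A's loop invariant, first component: it accumulates the set of seen elements.
theorem pvFoldA_fst (xs : List Int) (U D : PySem.Set Int) :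
    (xs.foldl pvStepA (U, D)).1 = xs.foldl PySem.Set.add U := by
  induction xs generalizing U D with
  | nil => rfl
  | cons a xs ih =>
    simp only [List.foldl_cons, pvStepA]
    by_cases h : U.contains a = true
    · rw [if_pos h, ih]
      have ha : a ∈ U := (PySem.Set.contains_iff U a).1 h
      have : U.add a = U := by simp [PySem.Set.add, ha]
      rw [this]
    · rw [if_neg h, ih]

-- A's loop invariant, second component: y ends in the duplicate set iff it was
-- already there or occurs in xs and was seen before / occurs at least twice.
theorem pvFoldA_snd_mem (xs : List Int) (U D : PySem.Set Int) (y : Int) :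
    y ∈ (xs.foldl pvStepA (U, D)).2 ↔
      y ∈ D ∨ (y ∈ xs ∧ (y ∈ U ∨ 2 ≤ xs.count y)) := by
  induction xs generalizing U D with
  | nil => simp
  | cons a xs ih =>
    simp only [List.foldl_cons, pvStepA]
    by_cases h : U.contains a = true
    · have ha : a ∈ U := (PySem.Set.contains_iff U a).1 h
      rw [if_pos h, ih, pvCountCons]
      simp only [PySem.Set.mem_add, List.mem_cons]
      constructor
      · rintro ((hD | rfl) | ⟨hx, hc⟩)
        · exact Or.inl hD
        · exact Or.inr ⟨Or.inl rfl, Or.inl ha⟩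
        · refine Or.inr ⟨Or.inr hx, ?_⟩
          rcases hc with hU | hn
          · exact Or.inl hU
          · right; split_ifs <;> omega
      · rintro (hD | ⟨hx, hc⟩)
        · exact Or.inl (Or.inl hD)
        · by_cases hy : y = a
          · exact Or.inl (Or.inr hy)
          · rcases hx with rfl | hx'
            · exact absurd rfl hy
            · refine Or.inr ⟨hx', ?_⟩
              rcases hc with hU | hn
              · exact Or.inl hU
              · rw [if_neg hy] at hn; right; omega
    · have ha : a ∉ U := fun hm => h ((PySem.Set.contains_iff U a).2 hm)
      rw [if_neg h, ih, pvCountCons]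
      simp only [PySem.Set.mem_add, List.mem_cons]
      constructor
      · rintro (hD | ⟨hx, hc⟩)
        · exact Or.inl hD
        · rcases hc with (hU | rfl) | hn
          · exact Or.inr ⟨Or.inr hx, Or.inl hU⟩
          · refine Or.inr ⟨Or.inr hx, Or.inr ?_⟩
            have : 1 ≤ xs.count y := List.one_le_count_iff.2 hx
            rw [if_pos rfl]; omega
          · refine Or.inr ⟨Or.inr hx, Or.inr ?_⟩
            split_ifs <;> omega
      · rintro (hD | ⟨hx, hc⟩)
        · exact Or.inl hD
        · by_cases hy : y = a
          · subst hy
            rcases hc with hU | hn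
            · exact absurd hU ha
            · rw [if_pos rfl] at hn
              have : 1 ≤ xs.count y := by omega
              exact Or.inr ⟨List.one_le_count_iff.1 this, Or.inl (Or.inr rfl)⟩
          · rcases hx with rfl | hx'
            · exact absurd rfl hy
            · rcases hc with hU | hn
              · exact Or.inr ⟨hx', Or.inl (Or.inl hU)⟩
              · rw [if_neg hy] at hn
                exact Or.inr ⟨hx', Or.inr (by omega)⟩

theorem pvFoldA_snd_nodup (xs : List Int) (U D : PySem.Set Int) (hD : D.Nodup) :
    (xs.foldl pvStepA (U, D)).2.Nodup := by
  induction xs generalizing U D with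
  | nil => exact hD
  | cons a xs ih =>
    simp only [List.foldl_cons, pvStepA]
    by_cases h : U.contains a = true
    · rw [if_pos h]; exact ih _ _ (PySem.Set.nodup_add D a hD)
    · rw [if_neg h]; exact ih _ _ hD

-- a Nodup list with the same membership as a Finset has its cardinality
theorem pvLenEqCard (L : List Int) (hL : L.Nodup) (S : Finset Int)
    (h : ∀ y, y ∈ L ↔ y ∈ S) : L.length = S.card := by
  have hS : L.toFinset = S := Finset.ext (by simpa [List.mem_toFinset] using h)
  rw [← hS, List.toFinset_card_of_nodup hL]

theorem pvA_eq_spec (xs : List Int) :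
    count_unique_and_duplicate_elements xs = ((pvD xs : Int), (pvM xs : Int)) := by
  unfold count_unique_and_duplicate_elements
  refine Prod.ext ?_ ?_
  · simp only
    congr 1
    rw [pvFoldA_fst]
    rw [show (PySem.Set.empty : PySem.Set Int) = [] from rfl, ← PySem.Set.ofList_eq_foldl]
    apply pvLenEqCard _ (PySem.Set.nodup_ofList xs)
    intro y; rw [PySem.Set.mem_ofList, List.mem_toFinset]
  · simp only
    congr 1
    apply pvLenEqCard _ (pvFoldA_snd_nodup xs _ _ List.nodup_nil)
    intro y
    rw [pvFoldA_snd_mem, Finset.mem_filter, List.mem_toFinset]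
    simp [PySem.Set.empty]

-- ---- B-side: the run scan computes (pvD, pvM) on a sorted list ----

-- on a ≤-sorted list a :: rest, everything past the leading run of a's is > a
theorem pvDropWhile_gt (a : Int) (rest : List Int)
    (h : (a :: rest).Pairwise (· ≤ ·)) :
    ∀ x ∈ rest.dropWhile (fun x => x == a), a < x := by
  induction rest with
  | nil => simp
  | cons b rest' ih =>
    rcases List.pairwise_cons.1 h with ⟨hab, hrest⟩
    rcases List.pairwise_cons.1 hrest with ⟨hb, hrest'⟩
    by_cases hba : (b == a) = true
    · have hb_eq : b = a := by simpa using hba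
      subst hb_eq
      simp only [List.dropWhile_cons]
      rw [if_pos hba]
      exact ih (List.pairwise_cons.2 ⟨fun x hx => hab x (List.mem_cons_of_mem _ hx), hrest'⟩)
    · simp only [List.dropWhile_cons]
      rw [if_neg hba]
      have hablt : a < b := lt_of_le_of_ne (hab b (List.mem_cons_self)) (by simpa using (Ne.symm (by simpa using hba)))
      intro x hx
      rcases List.mem_cons.1 hx with rfl | hx'
      · exact hablt
      · exact lt_of_lt_of_le hablt (hb x hx')

theorem pvScan_spec (l : List Int) (d m : Int) :
    l.Pairwise (· ≤ ·) → pvScanRuns l d m = (d + (pvD l : Int), m + (pvM l : Int)) := by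
  induction l, d, m using pvScanRuns.induct with
  | case1 d m => intro _; simp [pvScanRuns, pvD, pvM]
  | case2 a rest d m ih =>
    intro h
    set run := rest.takeWhile (fun x => x == a) with hrun
    set tail := rest.dropWhile (fun x => x == a) with htail
    have hsplit : run ++ tail = rest := List.takeWhile_append_dropWhile
    have hgt : ∀ x ∈ tail, a < x := pvDropWhile_gt a rest h
    have ha_tail : a ∉ tail := fun hm => lt_irrefl a (hgt a hm)
    have hrun_eq : ∀ x ∈ run, x = a := fun x hx => by
      simpa using List.mem_takeWhile_imp hx
    have htail_pw : tail.Pairwise (· ≤ ·) :=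
      List.Pairwise.sublist (List.dropWhile_sublist _) ((List.pairwise_cons.1 h).2)
    -- toFinset splits off a
    have hfin : (a :: rest).toFinset = insert a tail.toFinset := by
      ext x
      simp only [List.mem_toFinset, List.mem_cons, Finset.mem_insert]
      constructor
      · rintro (rfl | hx)
        · exact Or.inl rfl
        · rw [← hsplit] at hx
          rcases List.mem_append.1 hx with hx | hx
          · exact Or.inl (hrun_eq x hx)
          · exact Or.inr (by simpa [List.mem_toFinset] using hx)
      · rintro (rfl | hx)
        · exact Or.inl rfl
        · refine Or.inr ?_
          rw [← hsplit]
          exact List.mem_append.2 (Or.inr (by simpa [List.mem_toFinset] using hx))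
    have ha_notin : a ∉ tail.toFinset := by simpa [List.mem_toFinset] using ha_tail
    -- count facts
    have hcount_a : (a :: rest).count a = 1 + run.length := by
      rw [pvCountCons, ← hsplit, List.count_append]
      have h1 : run.count a = run.length := List.count_eq_length.2 (fun x hx => by simp [hrun_eq x hx])
      have h2 : tail.count a = 0 := List.count_eq_zero.2 ha_tail
      simp [h1, h2]; omega
    have hcount_y : ∀ y ∈ tail, (a :: rest).count y = tail.count y := by
      intro y hy
      have hya : y ≠ a := fun e => ha_tail (e ▸ hy)
      rw [pvCountCons, ← hsplit, List.count_append]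
      have h1 : run.count y = 0 := List.count_eq_zero.2 (fun hm => hya (hrun_eq y hm))
      simp [h1, hya]
    -- (A) distinct
    have hD : pvD (a :: rest) = pvD tail + 1 := by
      unfold pvD
      rw [hfin, Finset.card_insert_of_notMem ha_notin]
    -- (B) multiple
    have hM : pvM (a :: rest) = (if 0 < run.length then 1 else 0) + pvM tail := by
      unfold pvM
      rw [hfin, Finset.filter_insert]
      have hcong : tail.toFinset.filter (fun y => 2 ≤ (a :: rest).count y)
          = tail.toFinset.filter (fun y => 2 ≤ tail.count y) := by
        apply Finset.filter_congr
        intro y hy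
        rw [hcount_y y (List.mem_toFinset.1 hy)]
      by_cases hr : 0 < run.length
      · have : 2 ≤ (a :: rest).count a := by omega
        rw [if_pos this, if_pos hr,
          Finset.card_insert_of_notMem (fun hm => ha_notin (Finset.mem_of_mem_filter a hm)), hcong]
        omega
      · have : ¬ 2 ≤ (a :: rest).count a := by omega
        rw [if_neg this, if_neg hr, hcong]
        omega
    rw [pvScanRuns, ← hrun, ← htail]
    simp only [dite_eq_ite] at ih
    rw [ih htail_pw]
    refine Prod.ext ?_ ?_
    · simp only; rw [hD]; push_cast; ring
    · simp only; rw [hM]; push_cast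
      by_cases hr : 0 < run.length
      · simp only [hr, if_true]; ring
      · simp only [hr, if_false]; ring

-- ===== VERDICT (by name: the statement is the Claim_ definition above) =====
theorem count_unique_and_duplicate_elements_spec : Claim_equal_count_unique_and_duplicate_elements := by
  intro xs _
  unfold Spec_count_unique_and_duplicate_elements
  unfold count_unique_and_duplicate_elements_alt
  set s := PySem.List.sorted xs (fun x => x) false with hs
  have hperm : s.Perm xs := PySem.List.sorted_perm xs _ _
  have hpw : s.Pairwise (· ≤ ·) := by
    simpa using PySem.List.sorted_pairwise (xs := xs) (key := fun x => x)
  rw [pvScan_spec s 0 0 hpw, pvA_eq_spec]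
  have hDeq : pvD s = pvD xs := by unfold pvD; rw [List.toFinset_eq_of_perm _ _ hperm]
  have hMeq : pvM s = pvM xs := by
    unfold pvM
    rw [List.toFinset_eq_of_perm _ _ hperm]
    congr 1
    apply Finset.filter_congr
    intro y _
    rw [hperm.count_eq]
  rw [hDeq, hMeq]
  refine Prod.ext (by simp) (by simp)
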